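-- pv_equiv track=rewrite | github.com/saurabhp369/HackerRank_solutions | Game_of_stones.py | gameOfStones
-- ===== SOURCE A (Python) =====
-- def gameOfStones(n):
--     # Write your code here
--     winner = [0]*(n+1)
--     winner[0] = winner[1] = 1
--     for i in range(6, n+1):
--         if (winner[i-2] or winner[i-3] or winner[i-5]):
--             winner[i]=0
--         else:
--             winner[i]=1
--
--     if winner[n] == 0:
--         return "First"
--     else:
--         return "Second"
-- ===== SOURCE B (Python) =====
-- def gameOfStones(n):
--     # Periodic Sprague-Grundy pattern with period 7: positions with
--     # n % 7 in {0, 1} are losses for the player to move.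
--     return "Second" if n % 7 in (0, 1) else "First"
-- ===== Notes on version B (the rewrite author's own statement) =====
-- stated objective: faster
-- what changed: Replaced the O(n) DP table over all pile sizes by the closed-form period-7 rule (loser iff n % 7 in {0,1}), an O(1) arithmetic check.
import Mathlib
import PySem

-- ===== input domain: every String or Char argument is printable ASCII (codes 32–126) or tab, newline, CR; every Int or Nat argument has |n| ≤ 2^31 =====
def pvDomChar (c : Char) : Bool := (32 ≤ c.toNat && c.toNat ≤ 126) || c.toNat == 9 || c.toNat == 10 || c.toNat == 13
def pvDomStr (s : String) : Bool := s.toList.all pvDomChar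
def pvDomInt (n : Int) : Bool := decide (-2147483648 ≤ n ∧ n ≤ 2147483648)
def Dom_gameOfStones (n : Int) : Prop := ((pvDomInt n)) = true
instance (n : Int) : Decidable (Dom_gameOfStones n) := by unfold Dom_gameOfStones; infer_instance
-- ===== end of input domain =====

-- B replaces A's O(n) DP table by the closed-form period-7 rule (O(1)).
-- ===== PORT A =====
-- one loop step of A's DP: winner[i] = 0 if winner[i-2] or winner[i-3] or winner[i-5] else 1
-- (the table is an Array, like a Python list; all indices used are nonnegative and in range under Pre_)
def gosStep (w : Array Int) (i : Int) : Array Int :=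
  if w.getD (i - 2).toNat 0 ≠ 0 ∨ w.getD (i - 3).toNat 0 ≠ 0 ∨ w.getD (i - 5).toNat 0 ≠ 0 then
    w.setIfInBounds i.toNat 0
  else
    w.setIfInBounds i.toNat 1

def gameOfStones (n : Int) : String :=
  let winner := Array.replicate (n + 1).toNat (0 : Int)
  let winner := (winner.setIfInBounds 0 1).setIfInBounds 1 1
  let winner := (PySem.List.pyRange 6 (n + 1) 1).foldl gosStep winner
  if winner.getD n.toNat 0 = 0 then "First" else "Second"

-- ===== PORT B =====
def gameOfStones_alt (n : Int) : String :=
  if PySem.Int.mod n 7 = 0 ∨ PySem.Int.mod n 7 = 1 then "Second" else "First"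

-- ===== PRECONDITION & SPEC =====
-- Pre_ excludes nonpositive n, where A raises IndexError (the DP list is too short for its initial assignments)
def Pre_gameOfStones (n : Int) : Prop := 1 ≤ n
instance (n : Int) : Decidable (Pre_gameOfStones n) := by unfold Pre_gameOfStones; infer_instance
def pvWitness_gameOfStones : Int := 9

def Spec_gameOfStones (n : Int) (out : String) : Prop := out = gameOfStones_alt n
instance (n : Int) (out : String) : Decidable (Spec_gameOfStones n out) := by unfold Spec_gameOfStones; infer_instance

-- ===== CLAIM (what is proved, stated in full; the proofs are below) =====
def Claim_equal_gameOfStones : Prop := ∀ (n : Int), Dom_gameOfStones n → Pre_gameOfStones n → Spec_gameOfStones n (gameOfStones n)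

-- ===== LEMMAS AND PROOFS =====

-- the value A's DP computes for cell j
def gosTarget (j : Nat) : Int := if j % 7 = 0 ∨ j % 7 = 1 then 1 else 0

theorem gosTarget_step (m : Nat) :
    gosTarget (6 + m) =
      if gosTarget (4 + m) ≠ 0 ∨ gosTarget (3 + m) ≠ 0 ∨ gosTarget (1 + m) ≠ 0 then 0 else 1 := by
  unfold gosTarget
  split_ifs <;> omega

theorem agetD_lt (xs : Array Int) (j : Nat) (d : Int) (hj : j < xs.size) :
    xs.getD j d = xs[j] := by
  simp [Array.getD, hj]

theorem agetD_set_of_lt (xs : Array Int) (i j : Nat) (v : Int) (hj : j < xs.size) :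
    (xs.setIfInBounds i v).getD j 0 = if i = j then (if i < xs.size then v else xs.getD j 0) else xs.getD j 0 := by
  rw [agetD_lt _ _ _ (by simp only [Array.size_setIfInBounds]; exact hj), agetD_lt _ _ _ hj]
  rw [Array.getElem_setIfInBounds]
  · split_ifs <;> simp_all
  · exact hj

-- loop invariant: after m iterations every cell j < 6+m holds gosTarget j, the rest hold 0
theorem gos_inv (n : Int) (hn : 5 ≤ n) (m : Nat) (hm : (m : Int) ≤ n - 5) :
    ∃ L, (List.range m).foldl (fun w (k : Nat) => gosStep w (6 + (k : Int)))
          (((Array.replicate (n + 1).toNat (0 : Int)).setIfInBounds 0 1).setIfInBounds 1 1) = L ∧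
      L.size = (n + 1).toNat ∧
      ∀ j : Nat, j < (n + 1).toNat →
        L.getD j 0 = if (j : Int) < 6 + m then gosTarget j else 0 := by
  induction m with
  | zero =>
    refine ⟨_, rfl, by simp, ?_⟩
    intro j hj
    have h2 : (2 : Nat) < (n+1).toNat := by omega
    simp only [List.range_zero, List.foldl_nil]
    have hrep : (Array.replicate (n+1).toNat (0:Int)).getD j 0 = 0 := by
      rw [agetD_lt _ _ _ (by simpa using hj)]; simp
    rw [agetD_set_of_lt _ _ _ _ (by simp only [Array.size_setIfInBounds, Array.size_replicate]; exact hj),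
        agetD_set_of_lt _ _ _ _ (by simp only [Array.size_replicate]; exact hj)]
    simp only [Array.size_setIfInBounds, Array.size_replicate, hrep]
    unfold gosTarget
    split_ifs <;> omega
  | succ m ih =>
    obtain ⟨L, hL, hlen, hval⟩ := ih (by omega)
    rw [List.range_succ, List.foldl_append, hL]
    simp only [List.foldl_cons, List.foldl_nil]
    -- the loop body reads cells 4+m, 3+m, 1+m and writes cell 6+m
    have h4 : L.getD (6 + (m : Int) - 2).toNat 0 = gosTarget (4 + m) := by
      have h : (6 + (m : Int) - 2).toNat = 4 + m := by omega
      rw [h, hval (4 + m) (by omega)]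
      simp only [if_pos (by push_cast; omega : ((4 + m : Nat) : Int) < 6 + (m : Int))]
    have h3 : L.getD (6 + (m : Int) - 3).toNat 0 = gosTarget (3 + m) := by
      have h : (6 + (m : Int) - 3).toNat = 3 + m := by omega
      rw [h, hval (3 + m) (by omega)]
      simp only [if_pos (by push_cast; omega : ((3 + m : Nat) : Int) < 6 + (m : Int))]
    have h1 : L.getD (6 + (m : Int) - 5).toNat 0 = gosTarget (1 + m) := by
      have h : (6 + (m : Int) - 5).toNat = 1 + m := by omega
      rw [h, hval (1 + m) (by omega)]
      simp only [if_pos (by push_cast; omega : ((1 + m : Nat) : Int) < 6 + (m : Int))]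
    have hcast : (6 + (m : Int)).toNat = 6 + m := by omega
    have hset : gosStep L (6 + (m : Int)) = L.setIfInBounds (6 + m) (gosTarget (6 + m)) := by
      unfold gosStep
      rw [h4, h3, h1, gosTarget_step m, hcast]
      split_ifs <;> rfl
    refine ⟨_, rfl, ?_, ?_⟩
    · rw [hset]; simpa using hlen
    · intro j hj
      rw [hset, agetD_set_of_lt _ _ _ _ (by omega), hval j hj]
      have h6m : 6 + m < (n + 1).toNat := by omega
      split_ifs <;> push_cast at * <;> first | omega | (subst_vars; omega)

theorem gameOfStones_eq (n : Int) :
    gameOfStones n =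
      (if ((PySem.List.pyRange 6 (n + 1) 1).foldl gosStep
            (((Array.replicate (n + 1).toNat (0 : Int)).setIfInBounds 0 1).setIfInBounds 1 1)).getD n.toNat 0 = 0
       then "First" else "Second") := rfl

-- ===== VERDICT (by name: the statement is the Claim_ definition above) =====
theorem gameOfStones_spec : Claim_equal_gameOfStones := by
  intro n hdom hpre
  unfold Spec_gameOfStones
  unfold Pre_gameOfStones at hpre
  by_cases h5 : n ≤ 4
  · interval_cases n <;> decide
  · obtain ⟨L, hL, hlen, hval⟩ := gos_inv n (by omega) (n - 5).toNat (by omega)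
    rw [gameOfStones_eq]
    rw [PySem.List.pyRange_one, List.foldl_map]
    have h65 : (n + 1 - 6).toNat = (n - 5).toNat := by omega
    rw [h65, hL]
    rw [hval n.toNat (by omega),
        if_pos (by omega : ((n.toNat : Nat) : Int) < 6 + ((n - 5).toNat : Int))]
    have hmod : PySem.Int.mod n 7 = n % 7 := PySem.Int.mod_eq_emod_of_pos (by omega)
    unfold gameOfStones_alt gosTarget
    rw [hmod]
    by_cases hb : n % 7 = 0 ∨ n % 7 = 1
    · rw [if_pos (by omega : n.toNat % 7 = 0 ∨ n.toNat % 7 = 1), if_pos hb]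
      simp
    · rw [if_neg (by omega : ¬(n.toNat % 7 = 0 ∨ n.toNat % 7 = 1)), if_neg hb]
      simp
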